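-- pv_equiv track=rewrite | github.com/erikbabu/london_underground_commute_analysis | ldn_underground_info.py | formatted_user_stations
-- ===== SOURCE A (Python) =====
-- def formatted_user_stations(station_list):
--   """Builds title string showing all stations used for analyis."""
--   if len(station_list) == 1:
--     station_str = 'Commutes shown for '
--   else:
--     station_str = 'Difference in commutes between '
--   while station_list:
--     station = station_list.pop()
--     if len(station_list) > 1:
--       station_str += station + ", "
--     elif len(station_list) == 1:
--       station_str += station + " and "
--     else:
--       station_str += station
--   return station_str
-- ===== SOURCE B (Python) =====
-- def formatted_user_stations(station_list):
--   """Builds title string showing all stations used for analyis."""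
--   if len(station_list) == 1:
--     prefix = 'Commutes shown for '
--   else:
--     prefix = 'Difference in commutes between '
--   items = station_list[::-1]
--   station_list.clear()  # same observable mutation as A: the input list is left empty
--   if not items:
--     return prefix
--   if len(items) == 1:
--     return prefix + items[0]
--   return prefix + ", ".join(items[:-1]) + " and " + items[-1]
-- ===== Notes on version B (the rewrite author's own statement) =====
-- stated objective: faster
-- what changed: Replaces A's while-pop loop with per-iteration separator branching by a reversed copy plus clear() and a single join-based assembly (prefix, then comma-joined init, then ' and ' + last).
import Mathlib
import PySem

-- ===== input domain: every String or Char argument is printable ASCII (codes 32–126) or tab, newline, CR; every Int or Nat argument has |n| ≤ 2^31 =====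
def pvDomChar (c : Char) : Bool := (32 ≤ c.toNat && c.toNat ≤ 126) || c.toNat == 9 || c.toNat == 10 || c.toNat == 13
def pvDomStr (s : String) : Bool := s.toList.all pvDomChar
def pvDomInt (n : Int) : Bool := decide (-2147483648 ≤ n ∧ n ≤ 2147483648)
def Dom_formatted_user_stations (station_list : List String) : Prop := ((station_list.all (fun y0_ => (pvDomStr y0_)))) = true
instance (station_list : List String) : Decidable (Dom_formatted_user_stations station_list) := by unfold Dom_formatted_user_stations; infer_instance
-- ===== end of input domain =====

-- B replaces A's while-pop loop (per-iteration separator branching) with a reversed copy and one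
-- join-based assembly; equivalence is about the RETURN value — both A and B leave the input list empty.

-- ===== PORT A =====
-- the while loop: station = station_list.pop() is the last element, the remaining list is dropLast
def formatted_user_stations_loop (station_list : List String) (station_str : String) : String :=
  match station_list with
  | [] => station_str
  | x :: xs =>
    let station := (x :: xs).getLastD ""      -- station_list.pop(): last element
    let rest := (x :: xs).dropLast            -- the list after the pop
    let station_str :=
      if rest.length > 1 then station_str ++ station ++ ", "
      else if rest.length = 1 then station_str ++ station ++ " and "
      else station_str ++ station
    formatted_user_stations_loop rest station_str
termination_by station_list.length
decreasing_by simp [List.length_dropLast]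

def formatted_user_stations (station_list : List String) : String :=
  let station_str :=
    if station_list.length = 1 then "Commutes shown for "
    else "Difference in commutes between "
  formatted_user_stations_loop station_list station_str

-- ===== PORT B =====
def formatted_user_stations_alt (station_list : List String) : String :=
  let pre :=
    if station_list.length = 1 then "Commutes shown for "
    else "Difference in commutes between "
  let items := station_list.reverse          -- station_list[::-1]
  match items with
  | [] => pre
  | [x] => pre ++ x
  | x :: y :: rest =>
      pre ++ PySem.Str.join ", " ((x :: y :: rest).dropLast) ++ " and " ++ ((x :: y :: rest).getLastD "")

-- ===== PRECONDITION & SPEC =====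
def Spec_formatted_user_stations (station_list : List String) (out : String) : Prop := out = formatted_user_stations_alt station_list
instance (station_list : List String) (out : String) : Decidable (Spec_formatted_user_stations station_list out) := by unfold Spec_formatted_user_stations; infer_instance

-- ===== CLAIM (what is proved, stated in full; the proofs are below) =====
def Claim_equal_formatted_user_stations : Prop := ∀ (station_list : List String), Dom_formatted_user_stations station_list → Spec_formatted_user_stations station_list (formatted_user_stations station_list)

-- ===== LEMMAS AND PROOFS =====

-- the tail-part of B's assembly, indexed by the popped-off (reversed) order
def pvTail : List String → String
  | [] => ""
  | [x] => x
  | x :: y :: rest => PySem.Str.join ", " ((x :: y :: rest).dropLast) ++ " and " ++ ((x :: y :: rest).getLastD "")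

lemma pvJoin_singleton (a : String) : PySem.Str.join ", " [a] = a := by
  apply String.toList_inj.mp
  simp [PySem.Str.join, PySem.Chars.join_singleton]

lemma pvJoin_cons₂ (a b : String) (l : List String) :
    PySem.Str.join ", " (a :: b :: l) = a ++ ", " ++ PySem.Str.join ", " (b :: l) := by
  apply String.toList_inj.mp
  simp [PySem.Str.join, PySem.Chars.join_cons_cons]

lemma pvTail_cons₂ (x y : String) (rest : List String) :
    pvTail (x :: y :: rest) = x ++ (if rest = [] then " and " else ", ") ++ pvTail (y :: rest) := by
  cases rest with
  | nil => simp [pvTail, pvJoin_singleton, String.append_assoc]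
  | cons z t =>
    simp only [pvTail, if_neg (List.cons_ne_nil z t)]
    have hd : (x :: y :: z :: t).dropLast = x :: (y :: z :: t).dropLast := rfl
    rw [hd]
    have hne : (y :: z :: t).dropLast ≠ [] := by simp
    obtain ⟨b, l, hbl⟩ := List.exists_cons_of_ne_nil hne
    rw [hbl, pvJoin_cons₂]
    simp [String.append_assoc]

lemma pvLoop_rev (r : List String) (acc : String) :
    formatted_user_stations_loop r.reverse acc = acc ++ pvTail r := by
  induction r generalizing acc with
  | nil => rw [formatted_user_stations_loop.eq_def]; simp [pvTail]
  | cons x rest ih =>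
    rw [formatted_user_stations_loop.eq_def]
    cases hc : (x :: rest).reverse with
    | nil => simp at hc
    | cons z zs =>
      simp only []
      have hlast : (z :: zs).getLastD "" = x := by
        rw [← hc]; simp [List.getLastD_eq_getLast?, List.getLast?_reverse]
      have hdrop : (z :: zs).dropLast = rest.reverse := by
        rw [← hc]; simp [List.reverse_cons]
      rw [hlast, hdrop, ih, List.length_reverse]
      cases rest with
      | nil => simp [pvTail]
      | cons y t =>
        rw [pvTail_cons₂]
        cases t with
        | nil => simp [String.append_assoc]
        | cons z u => simp [String.append_assoc]

-- ===== VERDICT (by name: the statement is the Claim_ definition above) =====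
theorem formatted_user_stations_spec : Claim_equal_formatted_user_stations := by
  intro station_list _
  unfold Spec_formatted_user_stations formatted_user_stations formatted_user_stations_alt
  have hrev : station_list = station_list.reverse.reverse := by simp
  conv_lhs => rw [hrev]
  rw [pvLoop_rev]
  cases h : station_list.reverse with
  | nil =>
    have hl := congrArg List.length h
    simp at hl
    simp [pvTail, hl]
  | cons x rest =>
    have hl := congrArg List.length h
    simp at hl
    cases rest with
    | nil => simp [pvTail, hl]
    | cons y t =>
      have hl2 : station_list.length = t.length + 2 := by simpa using hl
      have : ¬ station_list.length = 1 := by omega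
      simp [pvTail, this, String.append_assoc]
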